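-- pv_equiv track=rewrite | github.com/toshamuravei/algo_course | 001_lucky_tickets/lucky_tickets.py | get_next_list
-- ===== SOURCE A (Python) =====
-- from typing import List
--
-- def get_next_list(previous_list: List) -> List:
--     """
--     Dynamically get next combinations list depending on given.
--     Assuming that next list is always 9 items longer.
--     """
--     new_list_length: int = len(previous_list) + 9
--     new_list: List = [0 for i in range(0, new_list_length)]
--     for new_list_idx in range(0, new_list_length):
--         sum_combinations: int = 0
--         for i in range(0, 10): # every next list is exactly 9 items "longer"
--             # evade python's negative indexing
--             if (new_list_idx - i) in range(0, len(previous_list)):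
--                 sum_combinations += previous_list[new_list_idx - i]
--             else:
--                 continue
--         new_list[new_list_idx] = sum_combinations
--     return new_list
-- ===== SOURCE B (Python) =====
-- def get_next_list(previous_list):
--     n = len(previous_list)
--     prefix = [0]
--     for x in previous_list:
--         prefix.append(prefix[-1] + x)
--     out = []
--     for j in range(n + 9):
--         lo = max(0, j - 9)
--         hi = min(j, n - 1)
--         out.append(prefix[hi + 1] - prefix[lo] if lo <= hi else 0)
--     return out
-- ===== Notes on version B (the rewrite author's own statement) =====
-- stated objective: faster
-- what changed: Replaces the nested fixed-width window re-summation with one prefix-sum pass followed by a constant-work pass computing each window as a difference of two prefix sums.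
import Mathlib
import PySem

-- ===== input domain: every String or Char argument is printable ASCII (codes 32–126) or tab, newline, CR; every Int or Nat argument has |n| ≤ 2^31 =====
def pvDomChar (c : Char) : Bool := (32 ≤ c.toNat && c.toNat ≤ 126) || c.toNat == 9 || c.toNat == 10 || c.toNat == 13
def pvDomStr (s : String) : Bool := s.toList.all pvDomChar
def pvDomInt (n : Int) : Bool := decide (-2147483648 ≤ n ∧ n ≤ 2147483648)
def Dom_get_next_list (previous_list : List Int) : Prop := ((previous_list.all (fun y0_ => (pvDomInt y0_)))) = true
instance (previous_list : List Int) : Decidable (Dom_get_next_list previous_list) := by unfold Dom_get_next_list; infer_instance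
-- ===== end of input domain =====

-- B replaces A's per-index 10-term window re-summation by one prefix-sum pass plus a
-- constant-work pass (each window = difference of two prefix sums); objective: faster (constant factor).

-- ===== PORT A =====
-- literal transliteration of A: zero list of length n+9, then for each index the
-- guarded 10-term window sum; 'x in range(0, len)' is the conjunction 0 ≤ x ∧ x < len.
def get_next_list (previous_list : List Int) : List Int :=
  let new_list_length : Int := (previous_list.length : Int) + 9
  let new_list : List Int := (PySem.List.pyRange 0 new_list_length 1).map (fun _ => (0 : Int))
  (PySem.List.pyRange 0 new_list_length 1).foldl
    (fun acc new_list_idx =>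
      let sum_combinations : Int := (PySem.List.pyRange 0 10 1).foldl
        (fun s i =>
          if 0 ≤ new_list_idx - i ∧ new_list_idx - i < (previous_list.length : Int) then
            s + PySem.List.pyGetD previous_list (new_list_idx - i) 0
          else s) 0
      PySem.List.pySetD acc new_list_idx sum_combinations) new_list

-- ===== PORT B =====
-- literal transliteration of Source B: prefix-sum list built by appending prefix[-1]+x,
-- then each output entry is a difference of two prefix sums over the clipped window.
def get_next_list_alt (previous_list : List Int) : List Int :=
  let n : Int := (previous_list.length : Int)
  let pfx : List Int :=
    previous_list.foldl (fun acc x => acc ++ [PySem.List.pyGetD acc (-1) 0 + x]) [0]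
  (PySem.List.pyRange 0 (n + 9) 1).foldl
    (fun out j =>
      let lo := max 0 (j - 9)
      let hi := min j (n - 1)
      out ++ [if lo ≤ hi then PySem.List.pyGetD pfx (hi + 1) 0 - PySem.List.pyGetD pfx lo 0 else 0]) []

-- ===== PRECONDITION & SPEC =====
def Spec_get_next_list (previous_list : List Int) (out : List Int) : Prop := out = get_next_list_alt previous_list
instance (previous_list : List Int) (out : List Int) : Decidable (Spec_get_next_list previous_list out) := by unfold Spec_get_next_list; infer_instance

-- ===== CLAIM (what is proved, stated in full; the proofs are below) =====
def Claim_equal_get_next_list : Prop := ∀ (previous_list : List Int), Dom_get_next_list previous_list → Spec_get_next_list previous_list (get_next_list previous_list)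

-- ===== LEMMAS AND PROOFS =====

-- clipped prefix sum: sum of the first (t clamped into [0, n]) elements
def pvSC (prev : List Int) (t : Int) : Int :=
  ((prev.take (min (max t 0) (prev.length : Int)).toNat).sum)

-- the canonical value both programs compute
def pvCanon (prev : List Int) : List Int :=
  (List.range (prev.length + 9)).map (fun j => pvSC prev ((j : Int) + 1) - pvSC prev ((j : Int) - 9))

theorem pvSC_telescope (prev : List Int) (t : Int) :
    pvSC prev (t + 1) - pvSC prev t =
      if 0 ≤ t ∧ t < (prev.length : Int) then prev.getD t.toNat 0 else 0 := by
  unfold pvSC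
  by_cases h : 0 ≤ t ∧ t < (prev.length : Int)
  · have ht1 : (min (max (t + 1) 0) ((prev.length : Int))).toNat = t.toNat + 1 := by omega
    have ht2 : (min (max t 0) ((prev.length : Int))).toNat = t.toNat := by omega
    have hlt : t.toNat < prev.length := by omega
    rw [ht1, ht2, if_pos h, List.sum_take_succ _ _ hlt, List.getD_eq_getElem _ _ hlt]
    ring
  · have he : (min (max (t + 1) 0) ((prev.length : Int))).toNat
        = (min (max t 0) ((prev.length : Int))).toNat := by omega
    rw [if_neg h, he]
    ring

theorem pv_win (prev : List Int) (j : Int) (m : Nat) :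
    (PySem.List.pyRange 0 (m : Int) 1).foldl
      (fun s i =>
        if 0 ≤ j - i ∧ j - i < (prev.length : Int) then
          s + PySem.List.pyGetD prev (j - i) 0
        else s) 0 = pvSC prev (j + 1) - pvSC prev (j + 1 - m) := by
  induction m with
  | zero => simp [PySem.List.pyRange_one_eq_nil]
  | succ m ih =>
    have hc : ((m + 1 : Nat) : Int) = (m : Int) + 1 := by push_cast; ring
    rw [hc, PySem.List.pyRange_one_succ_right (show (0:Int) ≤ (m:Int) by omega), List.foldl_append]
    simp only [List.foldl_cons, List.foldl_nil]
    rw [ih]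
    have T := pvSC_telescope prev (j - m)
    have e1 : j - (m : Int) + 1 = j + 1 - m := by ring
    split_ifs with h
    · rw [PySem.List.pyGetD_eq_getElem _ _ h.1 h.2] at *
      rw [List.getD_eq_getElem _ _ (by omega : (j - (m:Int)).toNat < prev.length)] at T
      rw [e1, if_pos h] at T
      have e2 : j + 1 - ((m : Int) + 1) = j - m := by ring
      rw [e2]
      linarith
    · rw [e1, if_neg h] at T
      have e2 : j + 1 - ((m : Int) + 1) = j - m := by ring
      rw [e2]
      linarith

theorem pv_build (g : Int → Int) (L : Nat) :
    ∀ (m : Nat), m ≤ L → ∀ (init : List Int), init.length = L →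
    (PySem.List.pyRange 0 (m : Int) 1).foldl
      (fun acc j => PySem.List.pySetD acc j (g j)) init
      = (List.range m).map (fun k => g k) ++ init.drop m := by
  intro m
  induction m with
  | zero => intro _ init _; simp [PySem.List.pyRange_one_eq_nil]
  | succ m ih =>
    intro hm init hlen
    have hc : ((m + 1 : Nat) : Int) = (m : Int) + 1 := by push_cast; ring
    rw [hc, PySem.List.pyRange_one_succ_right (show (0:Int) ≤ (m:Int) by omega), List.foldl_append]
    simp only [List.foldl_cons, List.foldl_nil]
    rw [ih (by omega) init hlen]
    have hmL : m < init.length := by omega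
    rw [List.drop_eq_getElem_cons hmL]
    rw [PySem.List.pySetD_natCast]
    have hlenA : ((List.range m).map (fun k => g k)).length = m := by simp
    rw [List.set_append, hlenA]
    simp [List.range_succ]
    rw [List.drop_eq_getElem_cons hmL, List.set_cons_zero]

theorem pvA_eq (prev : List Int) : get_next_list prev = pvCanon prev := by
  unfold get_next_list pvCanon
  have hL : ((prev.length : Int) + 9) = ((prev.length + 9 : Nat) : Int) := by push_cast; ring
  rw [hL]
  rw [pv_build (fun j => (PySem.List.pyRange 0 10 1).foldl
      (fun s i => if 0 ≤ j - i ∧ j - i < (prev.length : Int) then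
        s + PySem.List.pyGetD prev (j - i) 0 else s) 0)
      (prev.length + 9) (prev.length + 9) le_rfl _
      (by simp [PySem.List.length_pyRange_one]; omega)]
  rw [List.drop_of_length_le (by simp [PySem.List.length_pyRange_one])]
  rw [List.append_nil]
  refine List.map_congr_left (fun k hk => ?_)
  have h10 : (10 : Int) = ((10 : Nat) : Int) := by norm_num
  rw [h10, pv_win prev (k : Int) 10]
  have e : (k : Int) + 1 - ((10 : Nat) : Int) = (k : Int) - 9 := by push_cast; ring
  rw [e]

-- running partial sums of l starting from a (exclusive)
def pvPsums (a : Int) : List Int → List Int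
  | [] => []
  | x :: xs => (a + x) :: pvPsums (a + x) xs

theorem pv_foldl_psums (l : List Int) : ∀ (acc : List Int) (hne : acc ≠ []),
    l.foldl (fun acc x => acc ++ [PySem.List.pyGetD acc (-1) 0 + x]) acc
      = acc ++ pvPsums (acc.getLast hne) l := by
  induction l with
  | nil => intro acc hne; simp [pvPsums]
  | cons x xs ih =>
    intro acc hne
    simp only [List.foldl_cons]
    rw [PySem.List.pyGetD_neg_one acc 0 hne]
    rw [ih (acc ++ [acc.getLast hne + x]) (by simp)]
    rw [List.getLast_append_singleton]
    simp [pvPsums, List.append_assoc]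

theorem pvPsums_eq (l : List Int) : ∀ (a : Int),
    pvPsums a l = (List.range l.length).map (fun k => a + (l.take (k + 1)).sum) := by
  induction l with
  | nil => intro a; simp [pvPsums]
  | cons x xs ih =>
    intro a
    simp only [pvPsums, List.length_cons, List.range_succ_eq_map, List.map_cons, List.map_map]
    rw [ih (a + x)]
    congr 1
    · simp
    · refine List.map_congr_left (fun k hk => ?_)
      simp [List.take_succ_cons]
      ring

theorem pv_prefix (prev : List Int) :
    prev.foldl (fun acc x => acc ++ [PySem.List.pyGetD acc (-1) 0 + x]) [0]
      = (List.range (prev.length + 1)).map (fun k => (prev.take k).sum) := by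
  rw [pv_foldl_psums prev [0] (by simp)]
  simp only [List.getLast_singleton]
  rw [pvPsums_eq]
  rw [List.range_succ_eq_map, List.map_cons, List.map_map]
  simp [Function.comp]

theorem pvB_eq (prev : List Int) : get_next_list_alt prev = pvCanon prev := by
  unfold get_next_list_alt pvCanon
  rw [pv_prefix]
  rw [PySem.List.foldl_append_singleton_eq_map]
  rw [List.nil_append]
  rw [PySem.List.pyRange_one]
  rw [List.map_map]
  have hT : (((prev.length : Int) + 9) - 0).toNat = prev.length + 9 := by omega
  rw [hT]
  simp only [List.bind_eq_flatMap, List.pure_def, ← List.map_eq_flatMap, List.map_map]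
  refine List.map_congr_left (fun k hk => ?_)
  have hk9 : k < prev.length + 9 := List.mem_range.mp hk
  simp only [Function.comp_apply, zero_add]
  set P := (List.range (prev.length + 1)).map (fun k => (prev.take k).sum) with hP
  have hPlen : P.length = prev.length + 1 := by simp [hP]
  by_cases hn : prev.length = 0
  · have hpe : prev = [] := List.length_eq_zero_iff.mp hn
    subst hpe
    rw [if_neg (by simp)]
    simp [pvSC]
  · rw [if_pos (by omega)]
    have hhi : (0 : Int) ≤ min (k : Int) ((prev.length : Int) - 1) + 1 := by omega
    have hhi2 : min (k : Int) ((prev.length : Int) - 1) + 1 < (P.length : Int) := by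
      rw [hPlen]; omega
    have hlo : (0 : Int) ≤ max 0 ((k : Int) - 9) := by omega
    have hlo2 : max 0 ((k : Int) - 9) < (P.length : Int) := by rw [hPlen]; omega
    rw [PySem.List.pyGetD_eq_getElem _ _ hhi hhi2, PySem.List.pyGetD_eq_getElem _ _ hlo hlo2]
    have g1 : (min (k : Int) ((prev.length : Int) - 1) + 1).toNat < prev.length + 1 := by omega
    have g2 : (max 0 ((k : Int) - 9)).toNat < prev.length + 1 := by omega
    simp only [hP, List.getElem_map, List.getElem_range]
    unfold pvSC
    have e1 : (min (k : Int) ((prev.length : Int) - 1) + 1).toNat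
        = (min (max ((k : Int) + 1) 0) ((prev.length : Int))).toNat := by omega
    have e2 : (max 0 ((k : Int) - 9)).toNat
        = (min (max ((k : Int) - 9) 0) ((prev.length : Int))).toNat := by omega
    rw [e1, e2]

-- ===== VERDICT (by name: the statement is the Claim_ definition above) =====
theorem get_next_list_spec : Claim_equal_get_next_list := by
  intro prev _
  show get_next_list prev = get_next_list_alt prev
  rw [pvA_eq, pvB_eq]
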